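-- pv_equiv track=rewrite | github.com/qsantos/advent-of-code | day22/main.py | linear_powmod
-- ===== SOURCE A (Python) =====
-- from typing import List, Tuple
--
-- Linear = Tuple[int, int]
--
-- def linear_eval(p: Linear, v: int, m: int) -> int:
--     a, b = p
--     return (a + b * v) % m
--
-- def linear_compose(a: Linear, b: Linear, m: int) -> Linear:
--     return linear_eval(a, b[0], m), (a[1] * b[1] % m)
--
-- def linear_powmod(p: Linear, n: int, m: int) -> Linear:
--     ret = 0, 1
--     cur = p
--     while n:
--         if n % 2:
--             ret = linear_compose(cur, ret, m)
--         cur = linear_compose(cur, cur, m)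
--         n //= 2
--     return ret
-- ===== SOURCE B (Python) =====
-- from typing import Tuple
--
-- Linear = Tuple[int, int]
--
-- def linear_eval(p: Linear, v: int, m: int) -> int:
--     a, b = p
--     return (a + b * v) % m
--
-- def linear_compose(a: Linear, b: Linear, m: int) -> Linear:
--     return linear_eval(a, b[0], m), (a[1] * b[1] % m)
--
-- def linear_powmod(p: Linear, n: int, m: int) -> Linear:
--     if n == 0:
--         return 0, 1
--     r = linear_powmod(p, n // 2, m)
--     r = linear_compose(r, r, m)
--     if n % 2:
--         r = linear_compose(p, r, m)
--     return r
-- ===== Notes on version B (the rewrite author's own statement) =====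
-- stated objective: alternative
-- what changed: Replaces the iterative accumulate-and-square while loop (accumulator ret, running square cur) with a top-down recursive divide-and-conquer exponentiation: recurse on n//2, square the result, and compose once more with p when n is odd.
import Mathlib
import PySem

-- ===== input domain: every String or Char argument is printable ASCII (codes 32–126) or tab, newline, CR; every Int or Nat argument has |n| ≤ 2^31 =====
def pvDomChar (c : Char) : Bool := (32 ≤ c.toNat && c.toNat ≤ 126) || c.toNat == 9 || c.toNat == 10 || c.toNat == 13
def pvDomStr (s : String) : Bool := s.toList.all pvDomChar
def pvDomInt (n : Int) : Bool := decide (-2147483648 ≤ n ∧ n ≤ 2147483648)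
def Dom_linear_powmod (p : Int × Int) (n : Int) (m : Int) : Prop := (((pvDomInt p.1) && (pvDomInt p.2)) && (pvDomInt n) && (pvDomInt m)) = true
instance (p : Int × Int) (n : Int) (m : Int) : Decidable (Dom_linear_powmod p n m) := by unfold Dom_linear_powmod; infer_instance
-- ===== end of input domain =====

-- B replaces A's iterative accumulate-and-square loop by a recursive divide-and-conquer
-- exponentiation (recurse on n//2, square, compose with p if n is odd); same O(log n) cost.

-- ===== PORT A =====
def linear_eval (p : Int × Int) (v : Int) (m : Int) : Int :=
  PySem.Int.mod (p.1 + p.2 * v) m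

def linear_compose (a : Int × Int) (b : Int × Int) (m : Int) : Int × Int :=
  (linear_eval a b.1 m, PySem.Int.mod (a.2 * b.2) m)

-- A's while loop; Python loops forever for n < 0, which Pre_ excludes, so the
-- guard is '0 < n' (identical to 'n != 0' on the claimed domain) to make it total.
def linear_powmod_loop (m : Int) (ret cur : Int × Int) (n : Int) : Int × Int :=
  if _h : 0 < n then
    let ret' := if PySem.Int.mod n 2 ≠ 0 then linear_compose cur ret m else ret
    linear_powmod_loop m ret' (linear_compose cur cur m) (PySem.Int.floordiv n 2)
  else ret
termination_by n.toNat
decreasing_by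
  rw [PySem.Int.floordiv_eq_ediv_of_pos (by omega : (0:Int) < 2)]
  omega

def linear_powmod (p : Int × Int) (n : Int) (m : Int) : Int × Int :=
  linear_powmod_loop m (0, 1) p n

-- ===== PORT B =====
-- Python B recurses to the n == 0 base case; for n < 0 Python B never reaches it
-- (excluded by Pre_), so the guard is '0 < n' with base value (0, 1).
def linear_powmod_alt (p : Int × Int) (n : Int) (m : Int) : Int × Int :=
  if _h : 0 < n then
    let r := linear_powmod_alt p (PySem.Int.floordiv n 2) m
    let r := linear_compose r r m
    if PySem.Int.mod n 2 ≠ 0 then linear_compose p r m else r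
  else (0, 1)
termination_by n.toNat
decreasing_by
  rw [PySem.Int.floordiv_eq_ediv_of_pos (by omega : (0:Int) < 2)]
  omega

-- ===== PRECONDITION & SPEC =====
-- For n < 0 Python A loops forever, and for m = 0 with n > 0 the '%' raises
-- ZeroDivisionError; Pre_ excludes exactly those inputs (A returns nowhere else outside it).
def Pre_linear_powmod (p : Int × Int) (n : Int) (m : Int) : Prop := 0 ≤ n ∧ (n = 0 ∨ m ≠ 0)
instance (p : Int × Int) (n : Int) (m : Int) : Decidable (Pre_linear_powmod p n m) := by
  unfold Pre_linear_powmod; infer_instance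

def pvWitness_linear_powmod : (Int × Int) × Int × Int := ((3, 5), 10, 7)

def Spec_linear_powmod (p : Int × Int) (n : Int) (m : Int) (out : Int × Int) : Prop := out = linear_powmod_alt p n m
instance (p : Int × Int) (n : Int) (m : Int) (out : Int × Int) : Decidable (Spec_linear_powmod p n m out) := by unfold Spec_linear_powmod; infer_instance

-- ===== CLAIM (what is proved, stated in full; the proofs are below) =====
def Claim_equal_linear_powmod : Prop := ∀ (p : Int × Int) (n : Int) (m : Int), Dom_linear_powmod p n m → Pre_linear_powmod p n m → Spec_linear_powmod p n m (linear_powmod p n m)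

-- ===== LEMMAS AND PROOFS =====

-- Unreduced affine composition, its powers, and reduction mod m.
def pvC (a b : Int × Int) : Int × Int := (a.1 + a.2 * b.1, a.2 * b.2)

def pvPow (p : Int × Int) : Nat → Int × Int
  | 0 => (0, 1)
  | k + 1 => pvC p (pvPow p k)

def pvNrm (m : Int) (q : Int × Int) : Int × Int :=
  (PySem.Int.mod q.1 m, PySem.Int.mod q.2 m)

lemma pvFmod_congr (m a b : Int) (h : a % m = b % m) : Int.fmod a m = Int.fmod b m := by
  rw [Int.fmod_eq_emod, Int.fmod_eq_emod, h]
  rcases Decidable.em (0 ≤ m) with hm | hm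
  · simp [hm]
  · by_cases ha : m ∣ a
    · have hb : m ∣ b := by
        rwa [Int.dvd_iff_emod_eq_zero, ← h, ← Int.dvd_iff_emod_eq_zero]
      simp [ha, hb]
    · have hb : ¬ m ∣ b := by
        rw [Int.dvd_iff_emod_eq_zero, ← h, ← Int.dvd_iff_emod_eq_zero]; exact ha
      simp [ha, hb, hm]

lemma pvFmod_emod (x m : Int) : (Int.fmod x m) % m = x % m := by
  rw [Int.fmod_def, Int.sub_mul_emod_self_left]

-- 'same residues mod m' as a relation on pairs
def pvEqm (m : Int) (a b : Int × Int) : Prop := a.1 % m = b.1 % m ∧ a.2 % m = b.2 % m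

lemma pvEqm_refl (m : Int) (a : Int × Int) : pvEqm m a a := ⟨rfl, rfl⟩

lemma pvEqm_nrm (m : Int) (a : Int × Int) : pvEqm m (pvNrm m a) a :=
  ⟨pvFmod_emod a.1 m, pvFmod_emod a.2 m⟩

lemma pvNrm_eq_of_eqm (m : Int) (a b : Int × Int) (h : pvEqm m a b) : pvNrm m a = pvNrm m b := by
  obtain ⟨h1, h2⟩ := h
  simp only [pvNrm, PySem.Int.mod]
  exact Prod.ext (pvFmod_congr m a.1 b.1 h1) (pvFmod_congr m a.2 b.2 h2)

lemma pvEqm_c (m : Int) (a a' b b' : Int × Int)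
    (ha : pvEqm m a a') (hb : pvEqm m b b') : pvEqm m (pvC a b) (pvC a' b') := by
  obtain ⟨ha1, ha2⟩ := ha
  obtain ⟨hb1, hb2⟩ := hb
  constructor
  · show (a.1 + a.2 * b.1) % m = (a'.1 + a'.2 * b'.1) % m
    rw [Int.add_emod, Int.mul_emod, ha1, ha2, hb1, ← Int.mul_emod, ← Int.add_emod]
  · show (a.2 * b.2) % m = (a'.2 * b'.2) % m
    rw [Int.mul_emod, ha2, hb2, ← Int.mul_emod]

lemma pvEqm_pow (m : Int) (a b : Int × Int) (h : pvEqm m a b) (k : Nat) :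
    pvEqm m (pvPow a k) (pvPow b k) := by
  induction k with
  | zero => exact pvEqm_refl m (0, 1)
  | succ k ih => exact pvEqm_c m a b _ _ h ih

lemma pvCompose_eq (a b : Int × Int) (m : Int) :
    linear_compose a b m = pvNrm m (pvC a b) := rfl

lemma pvC_assoc (a b d : Int × Int) : pvC a (pvC b d) = pvC (pvC a b) d := by
  simp only [pvC]
  exact Prod.ext (by ring) (by ring)

lemma pvC_one_right (a : Int × Int) : pvC a (0, 1) = a := by
  simp [pvC]

lemma pvC_one_left (a : Int × Int) : pvC (0, 1) a = a := by
  simp [pvC]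

lemma pvPow_add (p : Int × Int) (i j : Nat) :
    pvPow p (i + j) = pvC (pvPow p i) (pvPow p j) := by
  induction i with
  | zero => simp [pvPow, pvC_one_left]
  | succ i ih =>
      have : i + 1 + j = (i + j) + 1 := by omega
      rw [this, pvPow, ih, pvPow, pvC_assoc]

lemma pvPow_one (p : Int × Int) : pvPow p 1 = p := by
  simp [pvPow, pvC_one_right]

lemma pvPow_sq (p : Int × Int) (k : Nat) : pvPow (pvC p p) k = pvPow p (2 * k) := by
  induction k with
  | zero => rfl
  | succ k ih =>
      rw [pvPow, ih, show 2 * (k + 1) = 2 + 2 * k from by omega, pvPow_add]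
      congr 1
      simp [pvPow, pvC_one_right]

-- parity / halving of a positive Int in Nat terms
lemma pvHalf_toNat (n : Int) (hn : 0 < n) :
    (PySem.Int.floordiv n 2).toNat = n.toNat / 2 ∧ 0 ≤ PySem.Int.floordiv n 2 := by
  rw [PySem.Int.floordiv_eq_ediv_of_pos (by omega : (0:Int) < 2)]
  omega

lemma pvOdd_iff (n : Int) (hn : 0 < n) :
    PySem.Int.mod n 2 ≠ 0 ↔ n.toNat % 2 = 1 := by
  rw [PySem.Int.mod_eq_emod_of_pos (by omega : (0:Int) < 2)]
  omega

-- A's loop computes the reduced k-th power composed with the accumulator.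
lemma pvPow_succ_right (p : Int × Int) (k : Nat) : pvPow p (k + 1) = pvC (pvPow p k) p := by
  rw [pvPow_add, pvPow_one]

lemma pvLoop_spec (m : Int) : ∀ (k : Nat) (n : Int), 0 < n → n.toNat = k →
    ∀ (ret cur : Int × Int),
      linear_powmod_loop m ret cur n = pvNrm m (pvC (pvPow cur k) ret) := by
  intro k
  induction k using Nat.strong_induction_on with
  | _ k ih =>
    intro n hn hk ret cur
    rw [linear_powmod_loop]
    simp only [dif_pos hn]
    obtain ⟨hhalf, hhpos⟩ := pvHalf_toNat n hn
    by_cases hz : PySem.Int.floordiv n 2 = 0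
    · -- n = 1 (its half is 0): the loop stops after this iteration
      rw [hz] at hhalf
      have hk1 : k = 1 := by simp at hhalf; omega
      have hodd : PySem.Int.mod n 2 ≠ 0 := by
        rw [pvOdd_iff n hn]; omega
      rw [hz, linear_powmod_loop, dif_neg (lt_irrefl (0 : Int)), if_pos hodd, hk1,
        pvPow_one, pvCompose_eq]
    · have hpos2 : 0 < PySem.Int.floordiv n 2 := lt_of_le_of_ne hhpos (Ne.symm hz)
      have hrec := ih (k / 2) (by omega) (PySem.Int.floordiv n 2) hpos2 (by omega)
      by_cases hodd : PySem.Int.mod n 2 ≠ 0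
      · have hk2 : 2 * (k / 2) + 1 = k := by
          have := (pvOdd_iff n hn).mp hodd; omega
        rw [if_pos hodd, hrec (linear_compose cur ret m) (linear_compose cur cur m),
          pvCompose_eq, pvCompose_eq]
        apply pvNrm_eq_of_eqm
        have hstep : pvEqm m
            (pvC (pvPow (pvNrm m (pvC cur cur)) (k / 2)) (pvNrm m (pvC cur ret)))
            (pvC (pvPow (pvC cur cur) (k / 2)) (pvC cur ret)) :=
          pvEqm_c m _ _ _ _ (pvEqm_pow m _ _ (pvEqm_nrm m _) _) (pvEqm_nrm m _)
        have hmid : pvC (pvPow (pvC cur cur) (k / 2)) (pvC cur ret)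
            = pvC (pvPow cur k) ret := by
          rw [pvPow_sq, pvC_assoc, ← pvPow_succ_right, hk2]
        rwa [hmid] at hstep
      · have hk2 : 2 * (k / 2) = k := by
          have hne : ¬ n.toNat % 2 = 1 := fun h => hodd ((pvOdd_iff n hn).mpr h)
          omega
        rw [if_neg hodd, hrec ret (linear_compose cur cur m), pvCompose_eq]
        apply pvNrm_eq_of_eqm
        have hstep : pvEqm m (pvC (pvPow (pvNrm m (pvC cur cur)) (k / 2)) ret)
            (pvC (pvPow (pvC cur cur) (k / 2)) ret) :=
          pvEqm_c m _ _ _ _ (pvEqm_pow m _ _ (pvEqm_nrm m _) _) (pvEqm_refl m ret)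
        rwa [pvPow_sq, hk2] at hstep

-- B computes the reduced k-th power.
lemma pvAlt_spec (m : Int) (p : Int × Int) : ∀ (k : Nat) (n : Int), 0 < n → n.toNat = k →
    linear_powmod_alt p n m = pvNrm m (pvPow p k) := by
  intro k
  induction k using Nat.strong_induction_on with
  | _ k ih =>
    intro n hn hk
    rw [linear_powmod_alt]
    simp only [dif_pos hn]
    obtain ⟨hhalf, hhpos⟩ := pvHalf_toNat n hn
    have hhv : pvEqm m (linear_powmod_alt p (PySem.Int.floordiv n 2) m) (pvPow p (k / 2)) := by
      by_cases hz : PySem.Int.floordiv n 2 = 0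
      · rw [hz] at hhalf
        have h0 : k / 2 = 0 := by simp at hhalf; omega
        rw [hz, h0, linear_powmod_alt, dif_neg (lt_irrefl (0 : Int))]
        exact pvEqm_refl m (0, 1)
      · rw [ih (k / 2) (by omega) _ (lt_of_le_of_ne hhpos (Ne.symm hz)) (by omega)]
        exact pvEqm_nrm m _
    have hsq : linear_compose (linear_powmod_alt p (PySem.Int.floordiv n 2) m)
        (linear_powmod_alt p (PySem.Int.floordiv n 2) m) m
        = pvNrm m (pvPow p (k / 2 + k / 2)) := by
      rw [pvCompose_eq, pvPow_add]
      exact pvNrm_eq_of_eqm m _ _ (pvEqm_c m _ _ _ _ hhv hhv)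
    by_cases hodd : PySem.Int.mod n 2 ≠ 0
    · have hk2 : k / 2 + k / 2 + 1 = k := by
        have := (pvOdd_iff n hn).mp hodd; omega
      rw [if_pos hodd, hsq, pvCompose_eq]
      have h1 : pvEqm m (pvC p (pvNrm m (pvPow p (k / 2 + k / 2))))
          (pvC p (pvPow p (k / 2 + k / 2))) :=
        pvEqm_c m _ _ _ _ (pvEqm_refl m p) (pvEqm_nrm m _)
      rw [pvNrm_eq_of_eqm m _ _ h1,
        show pvC p (pvPow p (k / 2 + k / 2)) = pvPow p (k / 2 + k / 2 + 1) from rfl, hk2]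
    · have hk2 : k / 2 + k / 2 = k := by
        have hne : ¬ n.toNat % 2 = 1 := fun h => hodd ((pvOdd_iff n hn).mpr h)
        omega
      rw [if_neg hodd, hsq, hk2]

-- ===== VERDICT (by name: the statement is the Claim_ definition above) =====
theorem linear_powmod_spec : Claim_equal_linear_powmod := by
  intro p n m _ hpre
  show linear_powmod p n m = linear_powmod_alt p n m
  obtain ⟨hn, _⟩ := hpre
  rcases lt_or_eq_of_le hn with hpos | hzero
  · rw [linear_powmod, pvLoop_spec m n.toNat n hpos rfl (0, 1) p,
      pvAlt_spec m p n.toNat n hpos rfl, pvC_one_right]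
  · rw [linear_powmod, ← hzero, linear_powmod_loop, linear_powmod_alt]
    norm_num
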